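-- pv_equiv track=rewrite | github.com/gentaiscool/lstm-attention | util.py | preprocess_lowercase_negation
-- ===== SOURCE A (Python) =====
-- def preprocess_lowercase_negation(seq):
-- 	seq = seq.lower()
-- 	modal_tobe = ["do", "does", "did", "will", "would", "could", "should", "shall", "may", "might", "must", "is", "are", "was", "were", "has", "have", "had"]
--
-- 	arr = seq.split(" ")
-- 	for j in range(len(arr)):
-- 		word = arr[j]
-- 		for i in range(len(modal_tobe)):
-- 			word = word.replace(modal_tobe[i] + "nt", modal_tobe[i] + " not")
-- 			word = word.replace(modal_tobe[i] + "n't", modal_tobe[i] + " not")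
-- 			arr[j] = word
--
-- 		word = word.replace("won't", "will not")
-- 		word = word.replace("can't", "cannot")
--
-- 	seq = ""
-- 	for j in range(len(arr)):
-- 		seq += arr[j]
-- 		if j < len(arr) - 1:
-- 			seq += " "
-- 	return seq
-- ===== SOURCE B (Python) =====
-- def preprocess_lowercase_negation(seq):
--     seq = seq.lower()
--     modal_tobe = ["do", "does", "did", "will", "would", "could", "should", "shall", "may", "might", "must", "is", "are", "was", "were", "has", "have", "had"]
--     for m in modal_tobe:
--         seq = seq.replace(m + "nt", m + " not")
--         seq = seq.replace(m + "n't", m + " not")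
--     return seq
-- ===== Notes on version B (the rewrite author's own statement) =====
-- stated objective: simpler
-- what changed: B drops the tokenize-and-rejoin structure entirely: it lowercases and applies the two modal replacements once to the whole string (valid because no replacement pattern contains a space), and omits the dead lines of A that modify a local variable never written back.
import Mathlib
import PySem

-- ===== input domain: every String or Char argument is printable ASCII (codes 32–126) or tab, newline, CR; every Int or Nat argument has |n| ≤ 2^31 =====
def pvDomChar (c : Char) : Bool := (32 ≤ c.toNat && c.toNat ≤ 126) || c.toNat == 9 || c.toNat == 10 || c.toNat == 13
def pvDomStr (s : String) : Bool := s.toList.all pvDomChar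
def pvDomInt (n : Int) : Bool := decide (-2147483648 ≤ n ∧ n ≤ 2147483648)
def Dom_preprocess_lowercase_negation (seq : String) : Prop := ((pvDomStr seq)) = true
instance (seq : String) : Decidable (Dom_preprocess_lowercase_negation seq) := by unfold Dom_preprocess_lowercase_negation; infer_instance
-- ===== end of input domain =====

-- B lowercases and applies the modal replacements to the whole string once, dropping A's
-- split(" ")/per-word loop/manual re-join and A's dead won't/can't lines (they modify a local
-- variable that is never written back); objective: simpler.

-- ===== PORT A =====
def pvModals : List String := ["do", "does", "did", "will", "would", "could", "should", "shall", "may", "might", "must", "is", "are", "was", "were", "has", "have", "had"]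

-- inner loop body of A: word = word.replace(m+"nt", m+" not"); word = word.replace(m+"n't", m+" not")
def pvWordStep (word : String) (m : String) : String :=
  PySem.Str.replace (PySem.Str.replace word (m ++ "nt") (m ++ " not")) (m ++ "n't") (m ++ " not")

def preprocess_lowercase_negation (seq : String) : String :=
  let seq1 := PySem.Str.lower seq
  -- arr = seq.split(" ")  (sep ≠ "", so split? is always some)
  let arr0 := (PySem.Str.split? seq1 " ").getD []
  -- for j: word = arr[j]; the inner loop writes arr[j] = word each round; the final two
  -- replaces act only on the local word (dead in the Python too, kept here as unused lets)
  let arr := arr0.map (fun w =>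
    let word := pvModals.foldl pvWordStep w
    let word1 := PySem.Str.replace word "won't" "will not"
    let _word2 := PySem.Str.replace word1 "can't" "cannot"
    word)
  -- seq = ""; for j in range(len(arr)): seq += arr[j]; if j < len(arr)-1: seq += " "
  -- (j is always in range, so pyGetD's default is never used)
  (PySem.List.pyRange 0 (PySem.List.len arr)).foldl
    (fun s j =>
      let s := s ++ PySem.List.pyGetD arr j ""
      if j < PySem.List.len arr - 1 then s ++ " " else s) ""

-- ===== PORT B =====
def preprocess_lowercase_negation_alt (seq : String) : String :=
  pvModals.foldl
    (fun s m =>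
      PySem.Str.replace (PySem.Str.replace s (m ++ "nt") (m ++ " not")) (m ++ "n't") (m ++ " not"))
    (PySem.Str.lower seq)

-- ===== PRECONDITION & SPEC =====
def Spec_preprocess_lowercase_negation (seq : String) (out : String) : Prop := out = preprocess_lowercase_negation_alt seq
instance (seq : String) (out : String) : Decidable (Spec_preprocess_lowercase_negation seq out) := by unfold Spec_preprocess_lowercase_negation; infer_instance

-- ===== CLAIM (what is proved, stated in full; the proofs are below) =====
def Claim_equal_preprocess_lowercase_negation : Prop := ∀ (seq : String), Dom_preprocess_lowercase_negation seq → Spec_preprocess_lowercase_negation seq (preprocess_lowercase_negation seq)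

-- ===== LEMMAS AND PROOFS =====

-- fuel-free version of PySem.Chars.replace for a nonempty pattern
def pvRep (old new : List Char) : List Char → List Char
  | [] => []
  | c :: t =>
    if old.isPrefixOf (c :: t) then new ++ pvRep old new (t.drop (old.length - 1))
    else c :: pvRep old new t
termination_by l => l.length
decreasing_by
  · simp only [List.length_drop, List.length_cons]; omega
  · simp

theorem pvGo_eq (old new : List Char) (h : old ≠ []) :
    ∀ (fuel : Nat) (l acc : List Char), l.length ≤ fuel →
      PySem.Chars.replace.go old new fuel l acc = acc.reverse ++ pvRep old new l := by
  intro fuel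
  induction fuel with
  | zero =>
    intro l acc hl
    have : l = [] := by cases l <;> simp_all
    subst this
    simp [PySem.Chars.replace.go, pvRep]
  | succ fuel ih =>
    intro l acc hl
    cases l with
    | nil => simp [PySem.Chars.replace.go, pvRep]
    | cons c t =>
      by_cases hp : old.isPrefixOf (c :: t)
      · have hlen : 1 ≤ old.length := by cases old <;> simp_all
        have hdrop : (c :: t).drop old.length = t.drop (old.length - 1) := by
          cases old with
          | nil => simp_all
          | cons o os => simp
        rw [PySem.Chars.replace.go, if_pos hp]
        rw [hdrop, ih _ _ (by simp only [List.length_drop, List.length_cons] at hl ⊢; omega)]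
        rw [pvRep]
        simp [hp]
      · rw [PySem.Chars.replace.go, if_neg hp]
        rw [ih _ _ (by simp only [List.length_cons] at hl; omega)]
        rw [pvRep]
        simp [hp]

theorem pvReplace_eq (old new s : List Char) (h : old ≠ []) :
    PySem.Chars.replace s old new = pvRep old new s := by
  have : old.isEmpty = false := by cases old <;> simp_all
  rw [PySem.Chars.replace]
  simp [this, pvGo_eq old new h s.length s [] (le_refl _)]

theorem pvPrefix_split (old s t : List Char) (hsp : (' ' : Char) ∉ old) :
    old <+: (s ++ ' ' :: t) ↔ old <+: s := by
  constructor
  · intro hpre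
    rcases Nat.lt_or_ge s.length old.length with hlt | hge
    · exfalso
      apply hsp
      have h1 : (s ++ ' ' :: t)[s.length]'(by simp) = ' ' := by
        simp [List.getElem_append_right (Nat.le_refl s.length)]
      have h2 := hpre.getElem (i := s.length) hlt
      have h3 : old[s.length]'hlt = ' ' := h2.trans h1
      rw [← h3]
      exact List.getElem_mem _
    · have := List.prefix_iff_eq_take.mp hpre
      rw [List.take_append_of_le_length hge] at this
      rw [this]
      exact List.take_prefix _ _
  · intro hpre
    exact hpre.trans (List.prefix_append s (' ' :: t))

theorem pvRep_split (old new : List Char) (h : old ≠ []) (hsp : (' ' : Char) ∉ old) :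
    ∀ (n : Nat) (s t : List Char), s.length ≤ n →
      pvRep old new (s ++ ' ' :: t) = pvRep old new s ++ ' ' :: pvRep old new t := by
  intro n
  induction n with
  | zero =>
    intro s t hs
    have : s = [] := by cases s <;> simp_all
    subst this
    have hnp : ¬ old.isPrefixOf (' ' :: t) := by
      intro hp
      cases old with
      | nil => exact h rfl
      | cons o os =>
        have := (List.cons_prefix_cons.mp (List.isPrefixOf_iff_prefix.mp hp)).1
        exact hsp (by rw [this]; exact List.mem_cons_self ..)
    simp only [List.nil_append]
    simp only [pvRep]
    rw [if_neg hnp]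
    simp
  | succ n ih =>
    intro s t hs
    cases s with
    | nil =>
      have hnp : ¬ old.isPrefixOf (' ' :: t) := by
        intro hp
        cases old with
        | nil => exact h rfl
        | cons o os =>
          have := (List.cons_prefix_cons.mp (List.isPrefixOf_iff_prefix.mp hp)).1
          exact hsp (by rw [this]; exact List.mem_cons_self ..)
      simp only [List.nil_append]
      simp only [pvRep]
      rw [if_neg hnp]
      simp
    | cons c s' =>
      have hiff := pvPrefix_split old (c :: s') t hsp
      by_cases hp : old.isPrefixOf (c :: s')
      · have hp' : old.isPrefixOf (c :: (s' ++ ' ' :: t)) :=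
          List.isPrefixOf_iff_prefix.mpr (hiff.mpr (List.isPrefixOf_iff_prefix.mp hp))
        have hlen : old.length ≤ s'.length + 1 :=
          (List.isPrefixOf_iff_prefix.mp hp).length_le
        rw [List.cons_append]
        simp only [pvRep]
        rw [if_pos hp', if_pos hp]
        have hd : (s' ++ ' ' :: t).drop (old.length - 1) =
            (s'.drop (old.length - 1)) ++ ' ' :: t := by
          rw [List.drop_append_of_le_length (by omega)]
        rw [hd, ih _ _ (by simp only [List.length_drop, List.length_cons] at hs ⊢; omega)]
        simp
      · have hp' : ¬ old.isPrefixOf (c :: (s' ++ ' ' :: t)) := by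
          intro hcon
          exact hp (List.isPrefixOf_iff_prefix.mpr (hiff.mp (List.isPrefixOf_iff_prefix.mp hcon)))
        rw [List.cons_append]
        simp only [pvRep]
        rw [if_neg hp', if_neg hp]
        rw [ih _ _ (by simp only [List.length_cons] at hs; omega)]
        simp

theorem pvIC_cons (x : List Char) (l : List (List Char)) (hl : l ≠ []) :
    [' '].intercalate (x :: l) = x ++ ' ' :: [' '].intercalate l := by
  cases l with
  | nil => exact absurd rfl hl
  | cons y l' => simp [List.intercalate, List.intersperse]

theorem pvIC_append (xs : List (List Char)) (x : List Char) (h : xs ≠ []) :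
    [' '].intercalate (xs ++ [x]) = [' '].intercalate xs ++ ' ' :: x := by
  induction xs with
  | nil => exact absurd rfl h
  | cons a l ih =>
    cases l with
    | nil => simp [List.intercalate, List.intersperse]
    | cons b l' =>
      rw [List.cons_append, pvIC_cons _ _ (by simp), pvIC_cons _ _ (by simp), ih (by simp)]
      simp

theorem pvRep_intercalate (old new : List Char) (h : old ≠ []) (hsp : (' ' : Char) ∉ old) :
    ∀ (ws : List (List Char)),
      pvRep old new ([' '].intercalate ws) = [' '].intercalate (ws.map (pvRep old new)) := by
  intro ws
  induction ws with
  | nil => simp [List.intercalate, pvRep]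
  | cons w ws ih =>
    cases ws with
    | nil => simp [List.intercalate]
    | cons w2 ws' =>
      rw [pvIC_cons _ _ (by simp), pvRep_split old new h hsp (w.length) w _ (Nat.le_refl _), ih]
      conv_rhs => rw [List.map_cons, pvIC_cons _ _ (by simp)]

theorem pvSplitGo (fuel : Nat) :
    ∀ (l cur : List Char) (acc2 : List (List Char)), l.length ≤ fuel →
      [' '].intercalate (PySem.Chars.splitOn.go [' '] fuel l cur acc2) =
        [' '].intercalate ((cur.reverse :: acc2).reverse) ++ l := by
  induction fuel with
  | zero =>
    intro l cur acc2 hl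
    have : l = [] := by cases l <;> simp_all
    subst this
    simp [PySem.Chars.splitOn.go]
  | succ fuel ih =>
    intro l cur acc2 hl
    cases l with
    | nil => simp [PySem.Chars.splitOn.go]
    | cons c rest =>
      rw [PySem.Chars.splitOn.go]
      by_cases hc : c = ' '
      · subst hc
        have hp : [' '].isPrefixOf (' ' :: rest) = true := by simp [List.isPrefixOf]
        rw [if_pos hp]
        have : List.drop [' '].length (' ' :: rest) = rest := by simp
        rw [this, ih _ _ _ (by simp at hl; omega)]
        rw [show (([] : List Char).reverse :: cur.reverse :: acc2).reverse
              = (cur.reverse :: acc2).reverse ++ [[]] by simp]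
        rw [pvIC_append _ _ (by simp)]
        simp
      · have hp : [' '].isPrefixOf (c :: rest) = false := by
          simp [List.isPrefixOf]
          intro hcon
          exact absurd hcon.symm hc
        rw [if_neg (by simp [hp])]
        rw [ih _ _ _ (by simp at hl; omega)]
        rw [show ((c :: cur).reverse :: acc2).reverse
              = acc2.reverse ++ [cur.reverse ++ [c]] by simp]
        rw [show ((cur.reverse :: acc2)).reverse = acc2.reverse ++ [cur.reverse] by simp]
        cases h2 : acc2.reverse with
        | nil => simp [List.intercalate]
        | cons a as =>
          rw [pvIC_append _ _ (by simp), pvIC_append _ _ (by simp)]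
          simp

theorem pvJoin_splitOn (s : List Char) :
    [' '].intercalate (PySem.Chars.splitOn s [' ']) = s := by
  rw [PySem.Chars.splitOn, pvSplitGo _ _ _ _ (by omega)]
  simp [List.intercalate]

-- one modal step of both loops, on the char level
def pvCStep (m : List Char) (w : List Char) : List Char :=
  PySem.Chars.replace (PySem.Chars.replace w (m ++ ['n','t']) (m ++ [' ','n','o','t'])) (m ++ ['n','\'','t']) (m ++ [' ','n','o','t'])

theorem pvCStep_intercalate (m : List Char) (hsp : (' ' : Char) ∉ m) (ws : List (List Char)) :
    pvCStep m ([' '].intercalate ws) = [' '].intercalate (ws.map (pvCStep m)) := by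
  have h1 : m ++ ['n','t'] ≠ [] := by simp
  have h2 : m ++ ['n','\'','t'] ≠ [] := by simp
  have hs1 : (' ' : Char) ∉ m ++ ['n','t'] := by simp [hsp]
  have hs2 : (' ' : Char) ∉ m ++ ['n','\'','t'] := by simp [hsp]
  unfold pvCStep
  rw [pvReplace_eq _ _ _ h1, pvReplace_eq _ _ _ h2,
    pvRep_intercalate _ _ h1 hs1, pvRep_intercalate _ _ h2 hs2, List.map_map]
  congr 1
  ext w
  simp [pvReplace_eq _ _ _ h1, pvReplace_eq _ _ _ h2]

theorem pvFold_intercalate (ms : List (List Char)) (hms : ∀ m ∈ ms, (' ' : Char) ∉ m) :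
    ∀ (ws : List (List Char)),
      [' '].intercalate (ws.map (fun w => ms.foldl (fun w m => pvCStep m w) w)) =
        ms.foldl (fun s m => pvCStep m s) ([' '].intercalate ws) := by
  induction ms with
  | nil => intro ws; simp
  | cons m ms ih =>
    intro ws
    simp only [List.foldl_cons]
    have hcomp : (fun w => List.foldl (fun w m => pvCStep m w) (pvCStep m w) ms)
        = (fun w => List.foldl (fun w m => pvCStep m w) w ms) ∘ (pvCStep m) := rfl
    rw [hcomp, ← List.map_map, ih (fun x hx => hms x (by simp [hx])),
      ← pvCStep_intercalate m (hms m (by simp)) ws]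

theorem pvWordStep_toList (w m : String) : (pvWordStep w m).toList = pvCStep m.toList w.toList := by
  simp [pvWordStep, pvCStep, PySem.Str.toList_replace, String.toList_append]

theorem pvFoldStep_toList (ms : List String) :
    ∀ (w : String),
      (ms.foldl pvWordStep w).toList =
        (ms.map String.toList).foldl (fun s m => pvCStep m s) w.toList := by
  induction ms with
  | nil => intro w; simp
  | cons m ms ih =>
    intro w
    simp only [List.foldl_cons, List.map_cons, ih, pvWordStep_toList]

theorem pvPyRange_nil (a : Int) : PySem.List.pyRange a a = [] := by
  simp [PySem.List.pyRange]

theorem pvJoinLoopAux (arr : List String) :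
    ∀ (d k : Nat), k + d = arr.length → ∀ (acc : String),
      ((PySem.List.pyRange (k : Int) (PySem.List.len arr)).foldl
        (fun s j =>
          let s := s ++ PySem.List.pyGetD arr j ""
          if j < PySem.List.len arr - 1 then s ++ " " else s) acc).toList =
      acc.toList ++ [' '].intercalate ((arr.drop k).map String.toList) := by
  intro d
  induction d with
  | zero =>
    intro k hk acc
    have hk' : (k : Int) = PySem.List.len arr := by simp [PySem.List.len]; omega
    have hd : arr.drop k = [] := List.drop_of_length_le (by omega)
    rw [hk', pvPyRange_nil]
    simp [hd, List.intercalate]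
  | succ d ih =>
    intro k hk acc
    have hlt : (k : Int) < PySem.List.len arr := by simp [PySem.List.len]; omega
    rw [PySem.List.pyRange_one_cons hlt, List.foldl_cons]
    have hcast : ((k : Int) + 1) = ((k + 1 : Nat) : Int) := by push_cast; ring
    rw [hcast, ih (k + 1) (by omega)]
    have hklen : k < arr.length := by omega
    have hget : PySem.List.pyGetD arr (k : Int) "" = arr[k] := by
      rw [PySem.List.pyGetD_natCast, List.getD_eq_getElem _ _ hklen]
    have hdrop : arr.drop k = arr[k] :: arr.drop (k + 1) := List.drop_eq_getElem_cons hklen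
    by_cases hlast : k + 1 = arr.length
    · have hcond : ¬ ((k : Int) < PySem.List.len arr - 1) := by simp [PySem.List.len]; omega
      simp only [hget, hcond, if_false]
      rw [hdrop]
      have : arr.drop (k+1) = [] := List.drop_of_length_le (by omega)
      simp [this, List.intercalate, String.toList_append]
    · have hcond : ((k : Int) < PySem.List.len arr - 1) := by simp [PySem.List.len]; omega
      simp only [hget, hcond, if_pos]
      rw [hdrop, List.map_cons, pvIC_cons _ _ (by
        intro hcon
        have := List.drop_eq_nil_iff.mp (List.map_eq_nil_iff.mp hcon)
        omega)]
      simp [String.toList_append]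

theorem pvModals_space_free : ∀ m ∈ pvModals.map String.toList, (' ' : Char) ∉ m := by
  decide

-- ===== VERDICT (by name: the statement is the Claim_ definition above) =====
theorem preprocess_lowercase_negation_spec : Claim_equal_preprocess_lowercase_negation := by
  intro seq _hdom
  unfold Spec_preprocess_lowercase_negation
  apply String.toList_inj.mp
  have hB : preprocess_lowercase_negation_alt seq = pvModals.foldl pvWordStep (PySem.Str.lower seq) := rfl
  rw [hB, pvFoldStep_toList]
  unfold preprocess_lowercase_negation
  rw [show (0 : Int) = ((0 : Nat) : Int) from rfl]
  rw [pvJoinLoopAux _ _ 0 (Nat.zero_add _)]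
  have hsplit : PySem.Str.split? (PySem.Str.lower seq) " "
      = some ((PySem.Chars.splitOn (PySem.Str.lower seq).toList [' ']).map String.ofList) := by
    simp [PySem.Str.split?, PySem.Chars.split?]
  rw [hsplit]
  simp only [Option.getD_some, List.drop_zero, List.map_map, String.toList_empty, List.nil_append]
  have hmap : ((PySem.Chars.splitOn (PySem.Str.lower seq).toList [' ']).map
        (String.toList ∘ (fun w =>
          let word := pvModals.foldl pvWordStep w
          let word1 := PySem.Str.replace word "won't" "will not"
          let _word2 := PySem.Str.replace word1 "can't" "cannot"
          word) ∘ String.ofList))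
      = (PySem.Chars.splitOn (PySem.Str.lower seq).toList [' ']).map
        (fun w => (pvModals.map String.toList).foldl (fun s m => pvCStep m s) w) := by
    apply List.map_congr_left
    intro w _
    simp [pvFoldStep_toList]
  rw [hmap]
  rw [pvFold_intercalate (pvModals.map String.toList) pvModals_space_free
    (PySem.Chars.splitOn (PySem.Str.lower seq).toList [' ']), pvJoin_splitOn]
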